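-- pv_equiv track=rewrite | github.com/diasalvt/adventofcode | 2022/8/solution.py | visible_idx_from_left
-- ===== SOURCE A (Python) =====
-- from itertools import accumulate, chain
--
-- Grid = list[list[int]]
--
-- Pos = tuple[int, int]
--
-- def visible_idx_from_left(grid: Grid) -> set[Pos]:
--     def filter_row(i, row):
--         return [
--             (i, j)
--             for j, (pred_max, curr_val)
--             in enumerate(zip(accumulate(row, max, initial=-1), row))
--             if pred_max < curr_val
--         ]
--
--     return {res for i, row in enumerate(grid) for res in filter_row(i, row)}
-- ===== SOURCE B (Python) =====
-- # Per-cell prefix-maximum rescan instead of A's accumulate running-max pass; simpler one-liner.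
-- def visible_idx_from_left(grid):
--     return {
--         (i, j)
--         for i, row in enumerate(grid)
--         for j, val in enumerate(row)
--         if val > max([-1] + row[:j])
--     }
-- ===== Notes on version B (the rewrite author's own statement) =====
-- stated objective: simpler
-- what changed: Replaces the accumulate/zip running-max single pass with a flat set comprehension that rechecks each cell against the maximum of its row prefix (with -1 floor), trading the linear pass for a per-cell rescan.
import Mathlib
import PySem

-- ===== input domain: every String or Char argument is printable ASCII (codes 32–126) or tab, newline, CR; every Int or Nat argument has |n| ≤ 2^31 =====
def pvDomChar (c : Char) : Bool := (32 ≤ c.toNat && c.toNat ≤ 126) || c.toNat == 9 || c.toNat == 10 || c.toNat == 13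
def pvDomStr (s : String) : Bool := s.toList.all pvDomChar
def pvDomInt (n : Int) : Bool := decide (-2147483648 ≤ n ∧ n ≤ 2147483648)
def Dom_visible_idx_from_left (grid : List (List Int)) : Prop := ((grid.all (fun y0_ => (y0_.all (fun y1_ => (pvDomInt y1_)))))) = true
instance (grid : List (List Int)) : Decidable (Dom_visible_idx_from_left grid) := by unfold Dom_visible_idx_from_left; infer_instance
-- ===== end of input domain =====

-- B replaces A's accumulate/zip running-max pass by a per-cell prefix-maximum rescan (simpler comprehension; not faster).


-- ===== PORT A =====
-- hand port of itertools.accumulate(row, max, initial=-1): yields the initial value, then running maxima (exact; length = row.length + 1)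
def pvAccMax (m : Int) : List Int → List Int
  | [] => [m]
  | v :: rest => m :: pvAccMax (max m v) rest

-- filter_row: [(i, j) for j, (pred_max, curr_val) in enumerate(zip(accumulate(row, max, initial=-1), row)) if pred_max < curr_val]
def pvFilterRow (i : Int) (row : List Int) : List (Int × Int) :=
  ((PySem.List.enumerate ((pvAccMax (-1) row).zip row) 0).filter
    (fun p => decide (p.2.1 < p.2.2))).map (fun p => (i, p.1))

def visible_idx_from_left (grid : List (List Int)) : List (Int × Int) :=
  PySem.Set.ofList ((PySem.List.enumerate grid 0).flatMap (fun p => pvFilterRow p.1 p.2))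

-- ===== PORT B =====
-- {(i, j) for i, row in enumerate(grid) for j, val in enumerate(row) if val > max([-1] + row[:j])}
-- max([-1] + row[:j]) on Ints is the left fold of max over row[:j] starting from -1 (exact).
def visible_idx_from_left_alt (grid : List (List Int)) : List (Int × Int) :=
  PySem.Set.ofList ((PySem.List.enumerate grid 0).flatMap (fun p =>
    ((PySem.List.enumerate p.2 0).filter
      (fun q => decide (List.foldl max (-1) (PySem.List.slice p.2 none (some q.1)) < q.2))).map
      (fun q => (p.1, q.1))))

-- ===== PRECONDITION & SPEC =====
def Spec_visible_idx_from_left (grid : List (List Int)) (out : List (Int × Int)) : Prop := out = visible_idx_from_left_alt grid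
instance (grid : List (List Int)) (out : List (Int × Int)) : Decidable (Spec_visible_idx_from_left grid out) := by unfold Spec_visible_idx_from_left; infer_instance

-- ===== CLAIM (what is proved, stated in full; the proofs are below) =====
def Claim_equal_visible_idx_from_left : Prop := ∀ (grid : List (List Int)), Dom_visible_idx_from_left grid → Spec_visible_idx_from_left grid (visible_idx_from_left grid)

-- ===== LEMMAS AND PROOFS =====

-- Core row invariant: processing the suffix `rest` of `row = done ++ rest` with running max
-- `foldl max (-1) done` and start index `done.length` agrees with B's per-cell prefix rescan.
theorem pv_row_inv (i : Int) (row : List Int) :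
    ∀ (rest done : List Int), row = done ++ rest →
    ((PySem.List.enumerate ((pvAccMax (List.foldl max (-1) done) rest).zip rest) (done.length : Int)).filter
        (fun p => decide (p.2.1 < p.2.2))).map (fun p => (i, p.1))
    = ((PySem.List.enumerate rest (done.length : Int)).filter
        (fun q => decide (List.foldl max (-1) (PySem.List.slice row none (some q.1)) < q.2))).map
        (fun q => (i, q.1)) := by
  intro rest
  induction rest with
  | nil => intro done _; simp [pvAccMax, PySem.List.enumerate]
  | cons v rest' ih =>
    intro done hrow
    have hslice : PySem.List.slice row none (some (done.length : Int)) = done := by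
      rw [PySem.List.slice_to_natCast, hrow, List.take_left]
    have hrec := ih (done ++ [v]) (by simp [hrow])
    have hfold : List.foldl max (-1) (done ++ [v]) = max (List.foldl max (-1) done) v := by
      simp [List.foldl_append]
    have hlen : ((done ++ [v]).length : Int) = (done.length : Int) + 1 := by
      simp
    rw [hfold, hlen] at hrec
    simp only [pvAccMax, List.zip_cons_cons, PySem.List.enumerate_cons, List.filter_cons]
    rw [hslice]
    by_cases h : List.foldl max (-1) done < v
    · simp [h, hrec]
    · simp [h, hrec]

theorem pv_row_eq (i : Int) (row : List Int) :
    pvFilterRow i row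
    = ((PySem.List.enumerate row 0).filter
        (fun q => decide (List.foldl max (-1) (PySem.List.slice row none (some q.1)) < q.2))).map
        (fun q => (i, q.1)) := by
  have h := pv_row_inv i row row [] (by simp)
  simpa [pvFilterRow] using h

-- ===== VERDICT (by name: the statement is the Claim_ definition above) =====
theorem visible_idx_from_left_spec : Claim_equal_visible_idx_from_left := by
  intro grid _
  unfold Spec_visible_idx_from_left visible_idx_from_left visible_idx_from_left_alt
  congr 1
  apply List.flatMap_congr
  intro p _
  exact pv_row_eq p.1 p.2
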